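-- pv_equiv track=rewrite | github.com/kodsnack/advent_of_code_2019 | estomagordo-python3/day_17b.py | infuse_numbers
-- ===== SOURCE A (Python) =====
-- def infuse_numbers(moves):
--     new = []
--     currlen = 0
--
--     for c in moves:
--         if c in 'RL':
--             if currlen > 0:
--                 lens = str(currlen)
--                 for cc in list(lens):
--                     new.append(cc)
--                 currlen = 0
--             new.append(c)
--         else:
--             currlen += 1
--
--     if currlen > 0:
--         lens = str(currlen)
--         for cc in list(lens):
--             new.append(cc)
--
--     return new
-- ===== SOURCE B (Python) =====
-- def infuse_numbers(moves):
--     out = []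
--     i = 0
--     n = len(moves)
--     while i < n:
--         if moves[i] in 'RL':
--             out.append(moves[i])
--             i += 1
--         else:
--             j = i
--             while j < n and moves[j] not in 'RL':
--                 j += 1
--             out.extend(str(j - i))
--             i = j
--     return out
-- ===== Notes on version B (the rewrite author's own statement) =====
-- stated objective: alternative
-- what changed: Replaces A's running-counter state machine with its duplicated end-of-input flush by a two-pointer run scanner: at each non-turn position an inner scan finds the whole maximal run, whose length is encoded at once, so no pending counter or final flush exists.
import Mathlib
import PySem

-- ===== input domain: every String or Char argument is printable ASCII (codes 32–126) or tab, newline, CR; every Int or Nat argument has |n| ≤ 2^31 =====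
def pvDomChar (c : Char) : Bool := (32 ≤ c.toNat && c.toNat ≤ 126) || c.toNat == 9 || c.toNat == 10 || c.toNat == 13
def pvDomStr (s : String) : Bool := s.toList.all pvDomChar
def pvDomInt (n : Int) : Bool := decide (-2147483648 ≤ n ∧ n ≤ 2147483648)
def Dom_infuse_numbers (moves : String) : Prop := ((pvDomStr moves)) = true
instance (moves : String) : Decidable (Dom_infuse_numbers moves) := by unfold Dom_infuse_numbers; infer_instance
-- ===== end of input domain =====

-- B replaces A's running-counter state machine (with its duplicated final flush) by a
-- two-pointer run scanner that encodes each maximal non-turn run at once. Objective: alternative.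

-- ===== PORT A =====
-- the digits of str(currlen), appended one by one ('for cc in list(lens): new.append(cc)')
def pvDigitsOf (n : Int) : List String := (PySem.Int.toStr n).toList.map (fun cc => String.ofList [cc])

-- the loop of A: state = (accumulated list 'new', running counter 'currlen'); final flush after the loop
def pvInfuseA : List Char → List String → Int → List String
  | [], new, currlen => if currlen > 0 then new ++ pvDigitsOf currlen else new
  | c :: rest, new, currlen =>
      if c == 'R' || c == 'L' then                      -- c in 'RL'
        let new' := if currlen > 0 then new ++ pvDigitsOf currlen else new
        pvInfuseA rest (new' ++ [String.ofList [c]]) 0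
      else
        pvInfuseA rest new (currlen + 1)

def infuse_numbers (moves : String) : List String := pvInfuseA moves.toList [] 0

-- ===== PORT B =====
-- Source B's two-pointer scan: a turn char is emitted and i advances by 1; otherwise the inner
-- while finds j = end of the maximal non-turn run (takeWhile/dropWhile of the tail), str(j-i)
-- is extended into the output, and the scan resumes at j.
def pvNonTurn (x : Char) : Bool := !(x == 'R' || x == 'L')

def pvInfuseB : List Char → List String
  | [] => []
  | c :: rest =>
      if c == 'R' || c == 'L' then
        String.ofList [c] :: pvInfuseB rest
      else
        let run := c :: rest.takeWhile pvNonTurn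
        ((PySem.Int.toStr run.length).toList.map (fun cc => String.ofList [cc])) ++
          pvInfuseB (rest.dropWhile pvNonTurn)
  termination_by l => l.length
  decreasing_by
    · simp
    · have := List.length_dropWhile_le pvNonTurn rest
      simp; omega

def infuse_numbers_alt (moves : String) : List String := pvInfuseB moves.toList

-- ===== PRECONDITION & SPEC =====
def Spec_infuse_numbers (moves : String) (out : List String) : Prop := out = infuse_numbers_alt moves
instance (moves : String) (out : List String) : Decidable (Spec_infuse_numbers moves out) := by unfold Spec_infuse_numbers; infer_instance

-- ===== CLAIM (what is proved, stated in full; the proofs are below) =====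
def Claim_equal_infuse_numbers : Prop := ∀ (moves : String), Dom_infuse_numbers moves → Spec_infuse_numbers moves (infuse_numbers moves)

-- ===== LEMMAS AND PROOFS =====
-- the encoding of a pending counter n : Nat (empty when n = 0)
def pvEnc (n : Nat) : List String :=
  if 0 < n then (PySem.Int.toStr (n : Int)).toList.map (fun cc => String.ofList [cc]) else []

-- B unfolds as: encode the leading non-turn run, then continue past it
theorem pvInfuseB_run (l : List Char) :
    pvInfuseB l = pvEnc (l.takeWhile pvNonTurn).length ++ pvInfuseB (l.dropWhile pvNonTurn) := by
  match l with
  | [] => simp [pvInfuseB, pvEnc]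
  | c :: rest =>
    by_cases h : (c == 'R' || c == 'L') = true
    · have hp : pvNonTurn c = false := by simp [pvNonTurn, h]
      simp [hp, pvEnc]
    · have hp : pvNonTurn c = true := by simp [pvNonTurn]; simpa using h
      simp only [pvInfuseB, h, List.takeWhile_cons, List.dropWhile_cons, hp]
      simp [pvEnc]

-- conversion between A's Int-guarded flush and pvEnc
theorem pvEnc_flush (m : Nat) (xs : List String) :
    (if ((m : Nat) : Int) > 0 then xs ++ pvDigitsOf m else xs) = xs ++ pvEnc m := by
  simp [pvEnc, pvDigitsOf]
  split_ifs <;> simp_all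

-- A's loop with counter n and accumulator 'new', written without the accumulator
theorem pvInfuseA_acc (l : List Char) : ∀ (new : List String) (n : Nat),
    pvInfuseA l new (n : Int) = new ++ pvEnc (n + (l.takeWhile pvNonTurn).length) ++ pvInfuseB (l.dropWhile pvNonTurn) := by
  induction l with
  | nil =>
    intro new n
    simp only [pvInfuseA, List.takeWhile_nil, List.dropWhile_nil, List.length_nil, Nat.add_zero,
      pvInfuseB, List.append_nil]
    exact pvEnc_flush n new
  | cons c rest ih =>
    intro new n
    by_cases h : (c == 'R' || c == 'L') = true
    · have hp : pvNonTurn c = false := by simp [pvNonTurn, h]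
      have hB : pvInfuseB (c :: rest) = String.ofList [c] :: pvInfuseB rest := by
        simp [pvInfuseB, h]
      simp only [pvInfuseA, h, if_true]
      rw [pvEnc_flush n new]
      rw [show (0 : Int) = ((0 : Nat) : Int) from rfl, ih]
      simp only [List.takeWhile_cons, List.dropWhile_cons, hp, Bool.false_eq_true, if_false]
      rw [hB, pvInfuseB_run rest]
      simp [List.append_assoc, pvEnc]
    · have hp : pvNonTurn c = true := by simp [pvNonTurn]; simpa using h
      simp only [pvInfuseA, h, Bool.false_eq_true, if_false, List.takeWhile_cons,
        List.dropWhile_cons, hp, if_true]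
      have : ((n : Int)) + 1 = ((n + 1 : Nat) : Int) := by push_cast; ring
      rw [this, ih]
      simp [List.length_cons]
      ring_nf

-- ===== VERDICT (by name: the statement is the Claim_ definition above) =====
theorem infuse_numbers_spec : Claim_equal_infuse_numbers := by
  intro moves _
  unfold Spec_infuse_numbers infuse_numbers infuse_numbers_alt
  have h := pvInfuseA_acc moves.toList [] 0
  simp only [Nat.cast_zero, Nat.zero_add, List.nil_append] at h
  rw [h, ← pvInfuseB_run]
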